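-- pv_equiv track=rewrite | github.com/harinkishore7/crypto | hill_cipher.py | parse_square_matrix
-- ===== SOURCE A (Python) =====
-- import math
--
-- def parse_square_matrix(text, size=None):
--     tokens = text.replace(',', ' ').split()
--     if not tokens:
--         raise ValueError("Matrix input is empty.")
--     if size is None or size == '':
--         root = int(math.isqrt(len(tokens)))
--         size = root
--     else:
--         size = int(size)
--     if len(tokens) != size * size:
--         raise ValueError(f"Expected {size*size} values.")
--     matrix = []
--     it = iter(tokens)
--     for _ in range(size):
--         matrix.append([int(next(it)) for _ in range(size)])
--     return matrix
-- ===== SOURCE B (Python) =====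
-- import math
--
-- def parse_square_matrix(text, size=None):
--     tokens = text.replace(',', ' ').split()
--     if not tokens:
--         raise ValueError("Matrix input is empty.")
--     if size is None or size == '':
--         size = int(math.isqrt(len(tokens)))
--     else:
--         size = int(size)
--     if len(tokens) != size * size:
--         raise ValueError(f"Expected {size*size} values.")
--     return [[int(t) for t in tokens[i*size:(i+1)*size]] for i in range(size)]
-- ===== Notes on version B (the rewrite author's own statement) =====
-- stated objective: alternative
-- what changed: Replaces the iterator-pulling nested row loop with index-based slice chunking of the token list, converting each slice to ints.
import Mathlib
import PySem

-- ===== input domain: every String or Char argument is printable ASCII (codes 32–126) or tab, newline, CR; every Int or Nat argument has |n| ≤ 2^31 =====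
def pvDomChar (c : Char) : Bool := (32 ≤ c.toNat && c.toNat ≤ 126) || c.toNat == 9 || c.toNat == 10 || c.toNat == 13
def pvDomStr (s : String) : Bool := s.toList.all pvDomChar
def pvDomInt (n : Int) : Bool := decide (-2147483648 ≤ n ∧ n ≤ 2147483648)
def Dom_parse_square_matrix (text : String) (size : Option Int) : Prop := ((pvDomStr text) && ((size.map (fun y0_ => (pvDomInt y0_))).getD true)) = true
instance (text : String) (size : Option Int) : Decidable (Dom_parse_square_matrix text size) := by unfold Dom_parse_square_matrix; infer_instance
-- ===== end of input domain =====

-- B replaces A's iterator-pulling nested row loop by one flat int-conversion pass plus slice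
-- chunking (objective: alternative, same cost); equivalence is about the return value only.

-- tokens = text.replace(',', ' ').split()  (shared by both Pythons verbatim)
def pvTokens (text : String) : List String :=
  PySem.Str.split₀ (PySem.Str.replace text "," " ")

-- int(t); Pre_ guarantees every token parses, so the default is never the value used
def pvConvInt (t : String) : Int := (PySem.Int.ofStr? t).getD 0

-- math.isqrt ported by hand (Nat.sqrt is not kernel-reducible): largest r ≤ k with r*r ≤ n;
-- exact for every Nat since the true root is at most n
def pvIsqrtAux (k n : Nat) : Nat :=
  match k with
  | 0 => 0
  | Nat.succ k' =>
    let r := pvIsqrtAux k' n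
    if (r + 1) * (r + 1) ≤ n then r + 1 else r
def pvIsqrt (n : Nat) : Nat := pvIsqrtAux n n

-- size resolution shared verbatim by both Pythons: isqrt(len) when size is None, else int(size)
def pvSize (toks : List String) (size : Option Int) : Int :=
  match size with
  | none => (pvIsqrt toks.length : Int)
  | some s => s

-- ===== PORT A =====
-- the 'for _ in range(size)' loop pulling size ints from the iterator each round:
-- each round takes the next sz tokens as a row and recurses on the rest
def pvRowsA (toks : List String) (k sz : Nat) : List (List Int) :=
  match k with
  | 0 => []
  | Nat.succ k' => (toks.take sz).map pvConvInt :: pvRowsA (toks.drop sz) k' sz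

def parse_square_matrix (text : String) (size : Option Int) : List (List Int) :=
  let tokens := pvTokens text
  let sz := pvSize tokens size
  pvRowsA tokens sz.toNat sz.toNat

-- ===== PORT B =====
-- [[int(t) for t in tokens[i*size:(i+1)*size]] for i in range(size)]
def parse_square_matrix_alt (text : String) (size : Option Int) : List (List Int) :=
  let tokens := pvTokens text
  let sz := pvSize tokens size
  (PySem.List.pyRange 0 sz 1).map
    (fun i => (PySem.List.slice tokens (some (i * sz)) (some ((i + 1) * sz))).map
      (fun t => (PySem.Int.ofStr? t).getD 0))

-- ===== PRECONDITION & SPEC =====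
-- Pre_ excludes exactly the inputs where the Python raises (ValueError): empty token list,
-- token count ≠ size², or — when the resolved size is positive, so the rows are actually
-- parsed — some token not an int literal (for size < 0 both Pythons return [] unparsed)
def Pre_parse_square_matrix (text : String) (size : Option Int) : Prop :=
  let toks := pvTokens text
  toks ≠ [] ∧ (toks.length : Int) = pvSize toks size * pvSize toks size ∧
    (0 < pvSize toks size → ∀ t ∈ toks, (PySem.Int.ofStr? t).isSome = true)
instance (text : String) (size : Option Int) : Decidable (Pre_parse_square_matrix text size) := by
  unfold Pre_parse_square_matrix; infer_instance

def pvWitness_parse_square_matrix : String × Option Int := ("1, 2, 3, 4", none)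

def Spec_parse_square_matrix (text : String) (size : Option Int) (out : List (List Int)) : Prop := out = parse_square_matrix_alt text size
instance (text : String) (size : Option Int) (out : List (List Int)) : Decidable (Spec_parse_square_matrix text size out) := by unfold Spec_parse_square_matrix; infer_instance

-- ===== CLAIM (what is proved, stated in full; the proofs are below) =====
def Claim_equal_parse_square_matrix : Prop := ∀ (text : String) (size : Option Int), Dom_parse_square_matrix text size → Pre_parse_square_matrix text size → Spec_parse_square_matrix text size (parse_square_matrix text size)

-- ===== LEMMAS AND PROOFS =====

-- A's k-round chunking recursion, closed form: row i is tokens[i*sz : i*sz+sz] converted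
lemma pvRowsA_eq_range (k : Nat) : ∀ (toks : List String) (sz : Nat),
    pvRowsA toks k sz
      = (List.range k).map (fun i => ((toks.drop (i * sz)).take sz).map pvConvInt) := by
  induction k with
  | zero => intro toks sz; simp [pvRowsA]
  | succ k' ih =>
    intro toks sz
    rw [List.range_succ_eq_map]
    simp only [pvRowsA, List.map_cons, List.map_map, ih, Nat.zero_mul, List.drop_zero]
    congr 1
    apply List.map_congr_left
    intro i _
    simp only [Function.comp, List.drop_drop]
    congr 2
    simp only [Nat.succ_eq_add_one]
    ring_nf

-- B's converted slice row equals the same drop/take chunk of the token list, converted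
lemma slice_row_eq (toks : List String) (sz i : Nat) :
    (PySem.List.slice toks (some ((i : Int) * (sz : Int)))
        (some (((i : Int) + 1) * (sz : Int)))).map (fun t => (PySem.Int.ofStr? t).getD 0)
      = ((toks.drop (i * sz)).take sz).map pvConvInt := by
  have h1 : (i : Int) * (sz : Int) = ((i * sz : Nat) : Int) := by push_cast; ring
  have h2 : ((i : Int) + 1) * (sz : Int) = ((i * sz + sz : Nat) : Int) := by push_cast; ring
  rw [h1, h2, PySem.List.slice_natCast]
  have h3 : i * sz + sz - i * sz = sz := by omega
  rw [h3]
  rfl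

-- both ports on a common nonnegative resolved size
lemma ports_eq_nat (toks : List String) (n : Nat) :
    pvRowsA toks n n
      = (PySem.List.pyRange 0 (n : Int) 1).map
          (fun i => (PySem.List.slice toks (some (i * (n : Int)))
            (some ((i + 1) * (n : Int)))).map (fun t => (PySem.Int.ofStr? t).getD 0)) := by
  rw [PySem.List.pyRange_one, pvRowsA_eq_range]
  simp only [Int.sub_zero, Int.toNat_natCast, List.map_map]
  apply List.map_congr_left
  intro i _
  simp only [Function.comp, Int.zero_add]
  rw [slice_row_eq]

-- both ports for an arbitrary Int resolved size (range(size) is empty for size < 0)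
lemma ports_eq_int (toks : List String) (sz : Int) :
    pvRowsA toks sz.toNat sz.toNat
      = (PySem.List.pyRange 0 sz 1).map
          (fun i => (PySem.List.slice toks (some (i * sz))
            (some ((i + 1) * sz))).map (fun t => (PySem.Int.ofStr? t).getD 0)) := by
  by_cases hpos : 0 ≤ sz
  · obtain ⟨n, rfl⟩ : ∃ n : Nat, sz = (n : Int) := ⟨sz.toNat, by omega⟩
    simpa only [Int.toNat_natCast] using ports_eq_nat toks n
  · rw [(by omega : sz.toNat = 0), PySem.List.pyRange_one_eq_nil (by omega)]
    simp [pvRowsA]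

-- ===== VERDICT (by name: the statement is the Claim_ definition above) =====
theorem parse_square_matrix_spec : Claim_equal_parse_square_matrix := by
  intro text size _ _
  exact ports_eq_int (pvTokens text) (pvSize (pvTokens text) size)
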